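-- pv_equiv track=rewrite | github.com/philip-papasavvas/finance-analysis | src/price_history_loader.py | get_unique_instruments
-- ===== SOURCE A (Python) =====
-- def get_unique_instruments(records: list[dict]) -> dict:
--     """
--     Extract unique instruments from price history records.
--
--     Args:
--         records: List of price history records.
--
--     Returns:
--         Dictionary mapping ticker to fund name.
--     """
--     instruments = {}
--     for record in records:
--         ticker = record['ticker']
--         fund_name = record['fund_name']
--         if ticker not in instruments:
--             instruments[ticker] = fund_name
--
--     return instruments
-- ===== SOURCE B (Python) =====
-- def get_unique_instruments(records: list[dict]) -> dict:
--     """Map each ticker to the fund name of its first record (two comprehension passes)."""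
--     first_name = {r['ticker']: r['fund_name'] for r in reversed(records)}
--     return {r['ticker']: first_name[r['ticker']] for r in records}
-- ===== Notes on version B (the rewrite author's own statement) =====
-- stated objective: alternative
-- what changed: Replaces A's single guarded loop ('insert only if ticker unseen') by two unguarded dict-comprehension passes: a reverse pass in which overwriting makes the first record's fund name win, then a forward pass re-keying every record through that map so keys come out in first-seen order.
import Mathlib
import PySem

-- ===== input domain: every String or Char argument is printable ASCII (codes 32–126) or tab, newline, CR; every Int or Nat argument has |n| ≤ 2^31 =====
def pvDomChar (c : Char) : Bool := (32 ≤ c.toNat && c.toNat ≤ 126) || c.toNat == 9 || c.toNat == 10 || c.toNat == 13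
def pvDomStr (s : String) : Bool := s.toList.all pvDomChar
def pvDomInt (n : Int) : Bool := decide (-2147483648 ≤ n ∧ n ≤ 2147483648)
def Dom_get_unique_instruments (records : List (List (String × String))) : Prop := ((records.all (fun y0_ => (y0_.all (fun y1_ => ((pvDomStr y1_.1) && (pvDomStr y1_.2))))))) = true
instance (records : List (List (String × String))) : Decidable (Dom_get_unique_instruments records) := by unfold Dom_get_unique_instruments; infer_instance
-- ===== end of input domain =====

-- ===== PORT A =====
-- B builds the same ticker→first-fund dict with two comprehension passes (reverse overwrite, then re-keying) instead of A's guarded loop; alternative decomposition, same cost.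
def pvTick (record : List (String × String)) : String :=
  ((PySem.Dict.mk record).get? "ticker").getD ""

def pvFund (record : List (String × String)) : String :=
  ((PySem.Dict.mk record).get? "fund_name").getD ""

def get_unique_instruments (records : List (List (String × String))) : List (String × String) :=
  (records.foldl
    (fun (instruments : PySem.Dict String String) record =>
      let ticker := pvTick record
      let fund_name := pvFund record
      if instruments.contains ticker then instruments
      else instruments.insert ticker fund_name)
    PySem.Dict.empty).items

-- ===== PORT B =====
def get_unique_instruments_alt (records : List (List (String × String))) : List (String × String) :=
  let first_name : PySem.Dict String String :=
    records.reverse.foldl (fun d r => d.insert (pvTick r) (pvFund r)) PySem.Dict.empty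
  (records.foldl (fun d r => d.insert (pvTick r) (first_name.getD (pvTick r) "")) PySem.Dict.empty).items

-- ===== PRECONDITION & SPEC =====
-- Pre_ excludes records missing the 'ticker' or 'fund_name' key, on which the Python A raises KeyError.
def Pre_get_unique_instruments (records : List (List (String × String))) : Prop :=
  ∀ r ∈ records, (PySem.Dict.mk r).contains "ticker" = true ∧ (PySem.Dict.mk r).contains "fund_name" = true

instance (records : List (List (String × String))) : Decidable (Pre_get_unique_instruments records) := by
  unfold Pre_get_unique_instruments; infer_instance

def pvWitness_get_unique_instruments : (List (List (String × String))) :=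
  [[("ticker", "VOD"), ("fund_name", "Vodafone")], [("ticker", "VOD"), ("fund_name", "Other")]]

def Spec_get_unique_instruments (records : List (List (String × String))) (out : List (String × String)) : Prop := out = get_unique_instruments_alt records
instance (records : List (List (String × String))) (out : List (String × String)) : Decidable (Spec_get_unique_instruments records out) := by unfold Spec_get_unique_instruments; infer_instance

-- ===== CLAIM (what is proved, stated in full; the proofs are below) =====
def Claim_equal_get_unique_instruments : Prop := ∀ (records : List (List (String × String))), Dom_get_unique_instruments records → Pre_get_unique_instruments records → Spec_get_unique_instruments records (get_unique_instruments records)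

-- ===== LEMMAS AND PROOFS =====

-- first record in rs with ticker t, its fund name
def pvFirstFund (rs : List (List (String × String))) (t : String) : Option String :=
  match rs with
  | [] => none
  | r :: rs => if pvTick r = t then some (pvFund r) else pvFirstFund rs t

theorem firstFund_append (xs ys : List (List (String × String))) (t : String) :
    pvFirstFund (xs ++ ys) t = (pvFirstFund xs t).or (pvFirstFund ys t) := by
  induction xs with
  | nil => simp [pvFirstFund]
  | cons r xs ih => by_cases h : pvTick r = t <;> simp [pvFirstFund, h, ih]

theorem foldA_get? (rs : List (List (String × String))) (d : PySem.Dict String String) (t : String) :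
    (rs.foldl (fun instruments record =>
        let ticker := pvTick record
        let fund_name := pvFund record
        if instruments.contains ticker then instruments
        else instruments.insert ticker fund_name) d).get? t
      = (d.get? t).or (pvFirstFund rs t) := by
  induction rs generalizing d with
  | nil => simp [pvFirstFund]
  | cons r rs ih =>
    simp only [List.foldl_cons, ih]
    by_cases h : pvTick r = t
    · subst h
      by_cases hc : d.contains (pvTick r) = true
      · have hs : (d.get? (pvTick r)).isSome := by
          rw [← PySem.Dict.contains_eq_isSome_get?]; exact hc
        cases hget : d.get? (pvTick r) with
        | none => rw [hget] at hs; simp at hs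
        | some v => simp [hc, hget, pvFirstFund]
      · simp [hc, PySem.Dict.get?_insert_self, pvFirstFund,
          (PySem.Dict.get?_eq_none_iff_contains d (pvTick r)).mpr (by simpa using hc)]
    · by_cases hc : d.contains (pvTick r) = true
      · simp [hc, pvFirstFund, h]
      · simp [hc, pvFirstFund, h, PySem.Dict.get?_insert_of_ne d _ (Ne.symm h)]

theorem foldC_get? (rs : List (List (String × String))) (d : PySem.Dict String String) (t : String) :
    (rs.foldl (fun d r => d.insert (pvTick r) (pvFund r)) d).get? t
      = (pvFirstFund rs.reverse t).or (d.get? t) := by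
  induction rs generalizing d with
  | nil => simp [pvFirstFund]
  | cons r rs ih =>
    simp only [List.foldl_cons, ih, List.reverse_cons, firstFund_append, Option.or_assoc]
    congr 1
    by_cases h : pvTick r = t
    · subst h; simp [pvFirstFund, PySem.Dict.get?_insert_self]
    · simp [pvFirstFund, h, PySem.Dict.get?_insert_of_ne d _ (Ne.symm h)]

theorem foldB_get? (g : String → String) (rs : List (List (String × String)))
    (d : PySem.Dict String String) (t : String) :
    (rs.foldl (fun d r => d.insert (pvTick r) (g (pvTick r))) d).get? t
      = if (pvFirstFund rs t).isSome then some (g t) else d.get? t := by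
  induction rs generalizing d with
  | nil => simp [pvFirstFund]
  | cons r rs ih =>
    simp only [List.foldl_cons, ih]
    by_cases h : pvTick r = t
    · subst h
      by_cases hs : (pvFirstFund rs (pvTick r)).isSome
      · simp [pvFirstFund, hs]
      · simp [pvFirstFund, hs, PySem.Dict.get?_insert_self]
    · by_cases hs : (pvFirstFund rs t).isSome
      · simp [pvFirstFund, h, hs]
      · simp [pvFirstFund, h, hs, PySem.Dict.get?_insert_of_ne d _ (Ne.symm h)]

-- the two final dicts have the same key list
theorem foldAB_keys (g : String → String) (rs : List (List (String × String)))
    (dA dB : PySem.Dict String String) (hk : dA.keys = dB.keys) :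
    (rs.foldl (fun instruments record =>
        let ticker := pvTick record
        let fund_name := pvFund record
        if instruments.contains ticker then instruments
        else instruments.insert ticker fund_name) dA).keys
      = (rs.foldl (fun d r => d.insert (pvTick r) (g (pvTick r))) dB).keys := by
  induction rs generalizing dA dB with
  | nil => exact hk
  | cons r rs ih =>
    simp only [List.foldl_cons]
    apply ih
    by_cases hc : dA.contains (pvTick r) = true
    · have hcB : dB.contains (pvTick r) = true := by
        rw [PySem.Dict.contains_eq_decide_mem_keys, ← hk,
          ← PySem.Dict.contains_eq_decide_mem_keys]; exact hc
      simp [hc, PySem.Dict.keys_insert_of_contains dB _ hcB, hk]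
    · have hcB : dB.contains (pvTick r) = false := by
        have := hc
        rw [PySem.Dict.contains_eq_decide_mem_keys, hk,
          ← PySem.Dict.contains_eq_decide_mem_keys] at this
        simpa using this
      simp [hc, PySem.Dict.keys_insert_of_not_contains dA _ (by simpa using hc),
        PySem.Dict.keys_insert_of_not_contains dB _ hcB, hk]

theorem get_unique_instruments_spec : Claim_equal_get_unique_instruments := by
  unfold Claim_equal_get_unique_instruments
  intro records _ _
  unfold Spec_get_unique_instruments get_unique_instruments get_unique_instruments_alt
  set g : String → String := fun t =>
    (records.reverse.foldl (fun d r => d.insert (pvTick r) (pvFund r)) PySem.Dict.empty).getD t ""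
    with hg
  set dA := records.foldl (fun instruments record =>
        let ticker := pvTick record
        let fund_name := pvFund record
        if instruments.contains ticker then instruments
        else instruments.insert ticker fund_name) PySem.Dict.empty with hdA
  set dB := records.foldl (fun d r => d.insert (pvTick r) (g (pvTick r))) PySem.Dict.empty with hdB
  have hkeys : dA.keys = dB.keys := by
    rw [hdA, hdB]; exact foldAB_keys g records _ _ rfl
  have hndB : dB.keys.Nodup := by
    rw [hdB]
    exact PySem.Dict.nodup_keys_foldl_insert_key records pvTick
      (fun d r => g (pvTick r)) PySem.Dict.empty (by simp)
  have hget : ∀ t, dA.get? t = dB.get? t := by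
    intro t
    rw [hdA, hdB, foldA_get?, foldB_get? g]
    have hfn : (records.reverse.foldl (fun d r => d.insert (pvTick r) (pvFund r))
        PySem.Dict.empty).get? t = pvFirstFund records t := by
      rw [foldC_get?]; simp
    cases hff : pvFirstFund records t with
    | none => simp
    | some v =>
      have : g t = v := by
        rw [hg]
        simp only []
        rw [PySem.Dict.getD_eq_get?_getD, hfn, hff]
        rfl
      simp [this]
  have hitemsA : dA.items = dA.keys.map (fun k => (k, dA.getD k "")) :=
    PySem.Dict.items_eq_map_keys dA (hkeys ▸ hndB) ""
  have hitemsB : dB.items = dB.keys.map (fun k => (k, dB.getD k "")) :=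
    PySem.Dict.items_eq_map_keys dB hndB ""
  rw [hitemsA, hitemsB, hkeys]
  apply List.map_congr_left
  intro k _
  rw [PySem.Dict.getD_eq_get?_getD, PySem.Dict.getD_eq_get?_getD, hget]
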